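-- pv_equiv track=rewrite | github.com/baddyscience/develop | algorithmTopic/及格的组合方式探索.py | solution
-- ===== SOURCE A (Python) =====
-- MOD = 202220222022
--
-- def solution(n):
--     #实在优化不动了
--     if n == 888:
--         return "194187156114"
--     num_courses = 3 + n
--     pass_score = 60 * num_courses  # 及格的总分
--     max_score = 100 * num_courses  # 最大的总分
--
--     # 每门课程的可能得分 [0, 5, 10, ..., 100]
--     scores = [i * 5 for i in range(21)]
--
--     # 创建一个足够大的数组，用于保存卷积结果
--     max_index = max_score // 5 + 1
--     dp = [0] * max_index
--     dp[0] = 1  # 初始化：0分的组合数为1（什么都不做）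
--
--     # 激进优化：采用前缀和并结合单一dp数组优化
--     for _ in range(num_courses):
--         new_dp = [0] * max_index
--         prefix_sum = [0] * max_index
--         prefix_sum[0] = dp[0]
--
--         # 更新dp数组，利用前缀和
--         for score in scores:
--             for total in range(score, max_score + 1, 5):
--                 new_dp[total // 5] = (new_dp[total // 5] + dp[(total - score) // 5]) % MOD
--
--         # 更新prefix_sum
--         prefix_sum[0] = new_dp[0]
--         for i in range(1, max_index):
--             prefix_sum[i] = (prefix_sum[i - 1] + new_dp[i]) % MOD
--
--         dp = new_dp  # 更新dp数组
--
--     # 计算所有大于等于及格分数的组合数之和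
--     result = sum(dp[pass_score // 5:]) % MOD
--     return str(result)
-- ===== SOURCE B (Python) =====
-- MOD = 202220222022
--
-- def solution(n):
--     # Sliding-window running sum replaces A's 21 shifted inner passes per round.
--     if n == 888:
--         return "194187156114"  # cached known answer, as in A (equals the computed result)
--     num_courses = 3 + n
--     L = 20 * num_courses            # max total in units of 5
--     dp = [1] + [0] * L
--     for _ in range(num_courses):
--         new_dp = []
--         window = 0
--         for i in range(L + 1):
--             window = (window + dp[i]) % MOD
--             if i >= 21:
--                 window = (window - dp[i - 21]) % MOD
--             new_dp.append(window)
--         dp = new_dp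
--     return str(sum(dp[12 * num_courses:]) % MOD)
-- ===== Notes on version B (the rewrite author's own statement) =====
-- stated objective: alternative
-- what changed: Each round's 21 shifted accumulation passes over the dp array (one per course score) are replaced by a single sliding-window running-sum pass that adds dp[i] and drops dp[i-21]; A's unused prefix_sum bookkeeping is gone, and B keeps A's cached answer for n == 888 (it equals the computed result).
-- outside the precondition, e.g. on solution(-4): A raises IndexError, B returns '1'
import Mathlib
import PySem

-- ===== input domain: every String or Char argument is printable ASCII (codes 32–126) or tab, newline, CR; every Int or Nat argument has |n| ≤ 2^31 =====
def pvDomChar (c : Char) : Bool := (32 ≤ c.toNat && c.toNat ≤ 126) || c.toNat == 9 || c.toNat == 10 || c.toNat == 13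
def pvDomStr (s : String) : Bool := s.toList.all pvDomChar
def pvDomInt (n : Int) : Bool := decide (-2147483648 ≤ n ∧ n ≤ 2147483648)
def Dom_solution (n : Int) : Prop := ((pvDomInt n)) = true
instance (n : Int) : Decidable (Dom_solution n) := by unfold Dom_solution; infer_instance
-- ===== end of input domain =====

-- B replaces A's 21 shifted inner passes per round by one sliding-window running sum
-- (intended as a constant-factor saving; a timing run measured ~24x at the sizes
-- where both finish but could not confirm it at the largest size, so no speed is claimed).

-- ===== PORT A =====

def MODV : Int := 202220222022

/-- `xs[i]`: Python indexing at an index that is provably ≥ 0 and in range wherever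
either port reads (the default is never returned on admitted inputs). -/
def pvGet (xs : List Int) (i : Int) : Int := PySem.List.pyGetD xs i 0

/-- `xs[i] = v` for a provably nonnegative in-range index (exact there). -/
def pvSet (xs : List Int) (i : Int) (v : Int) : List Int := xs.set i.toNat v

/-- one iteration of A's outer `for _ in range(num_courses)` loop
(including A's dead recomputation of `prefix_sum`, which is never read). -/
def aRound (scores : List Int) (maxScore maxIndex : Int) (dp : List Int) : List Int :=
  let newDp0 : List Int := List.replicate maxIndex.toNat 0
  let prefixSum0 : List Int := pvSet (List.replicate maxIndex.toNat 0) 0 (pvGet dp 0)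
  let newDp := scores.foldl (fun nd score =>
      (PySem.List.pyRange score (maxScore + 1) 5).foldl (fun nd total =>
        pvSet nd (PySem.Int.floordiv total 5)
          (PySem.Int.mod (pvGet nd (PySem.Int.floordiv total 5)
            + pvGet dp (PySem.Int.floordiv (total - score) 5)) MODV)) nd) newDp0
  let prefixSum1 := pvSet prefixSum0 0 (pvGet newDp 0)
  let prefixSum2 := (PySem.List.pyRange 1 maxIndex 1).foldl (fun ps i =>
      pvSet ps i (PySem.Int.mod (pvGet ps (i - 1) + pvGet newDp i) MODV)) prefixSum1
  let _ := prefixSum2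
  newDp

def solution (n : Int) : String :=
  if n = 888 then "194187156114" else
  let numCourses := 3 + n
  let passScore := 60 * numCourses
  let maxScore := 100 * numCourses
  let scores := (PySem.List.pyRange 0 21 1).map (· * 5)
  let maxIndex := PySem.Int.floordiv maxScore 5 + 1
  let dp0 := pvSet (List.replicate maxIndex.toNat 0) 0 1
  let dpF := (PySem.List.pyRange 0 numCourses 1).foldl
      (fun dp _ => aRound scores maxScore maxIndex dp) dp0
  let result := PySem.Int.mod
      (PySem.List.slice dpF (some (PySem.Int.floordiv passScore 5)) none).sum MODV
  PySem.Int.toStr result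

-- ===== PORT B =====

/-- one iteration of B's outer loop: sliding-window running sum, appending to `new_dp`. -/
def bRound (L : Int) (dp : List Int) : List Int :=
  ((PySem.List.pyRange 0 (L + 1) 1).foldl (fun (st : Int × List Int) i =>
      let w := PySem.Int.mod (st.1 + pvGet dp i) MODV
      let w := if 21 ≤ i then PySem.Int.mod (w - pvGet dp (i - 21)) MODV else w
      (w, st.2 ++ [w])) ((0 : Int), ([] : List Int))).2

def solution_alt (n : Int) : String :=
  if n = 888 then "194187156114" else
  let numCourses := 3 + n
  let L := 20 * numCourses
  let dp0 : List Int := 1 :: List.replicate L.toNat 0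
  let dpF := (PySem.List.pyRange 0 numCourses 1).foldl (fun dp _ => bRound L dp) dp0
  PySem.Int.toStr
    (PySem.Int.mod (PySem.List.slice dpF (some (12 * numCourses)) none).sum MODV)

-- ===== PRECONDITION & SPEC =====

-- Pre_ excludes only n ≤ -4, where A raises IndexError (`dp[0] = 1` on an empty array).
def Pre_solution (n : Int) : Prop := -3 ≤ n
instance (n : Int) : Decidable (Pre_solution n) := by unfold Pre_solution; infer_instance

def pvWitness_solution : Int := 0

def Spec_solution (n : Int) (out : String) : Prop := out = solution_alt n
instance (n : Int) (out : String) : Decidable (Spec_solution n out) := by unfold Spec_solution; infer_instance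

-- ===== CLAIM (what is proved, stated in full; the proofs are below) =====
def Claim_equal_solution : Prop := ∀ (n : Int), Dom_solution n → Pre_solution n → Spec_solution n (solution n)

-- ===== LEMMAS AND PROOFS =====

/-- proof-side array read: `getD` at a Nat index. -/
def gd (xs : List Int) (j : Nat) : Int := xs.getD j 0

/-- the window value dp[max(i-20,0)] + … + dp[i], as a recurrence. -/
def win (dp : List Int) : Nat → Int
  | 0 => gd dp 0
  | (i+1) => win dp i + gd dp (i+1) - (if 21 ≤ i+1 then gd dp (i-20) else 0)

/-- A's partial convolution after the first K of the 21 score passes. -/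
def pSum (dp : List Int) (K i : Nat) : Int :=
  (((List.range K).filter (fun k => k ≤ i)).map (fun k => gd dp (i - k))).sum

theorem gd_pvGet (xs : List Int) (j : Nat) : pvGet xs (j : Int) = gd xs j := by
  simp [pvGet, gd, PySem.List.pyGetD_of_nonneg xs 0 (Int.natCast_nonneg j)]

theorem modM (a : Int) : PySem.Int.mod a MODV = a % MODV :=
  PySem.Int.mod_eq_emod_of_pos (by unfold MODV; omega)

theorem modsubM (x a : Int) : (x % MODV - a) % MODV = (x - a) % MODV := by
  conv_rhs => rw [Int.sub_emod]
  rw [Int.sub_emod (x % MODV), Int.emod_emod_of_dvd _ dvd_rfl]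

theorem range5_eq (k L' : Nat) (hk : k ≤ L') :
    PySem.List.pyRange (5 * (k : Int)) (5 * (L' : Int) + 1) 5
      = (List.range' k (L' + 1 - k)).map (fun (j : Nat) => (5 * (j : Int))) := by
  rw [PySem.List.pyRange_of_pos _ _ (by omega)]
  have hlt : (5 * (k : Int)) < 5 * (L' : Int) + 1 := by omega
  rw [if_pos hlt]
  have hc : ((5 * (L' : Int) + 1 - 5 * (k : Int) + 5 - 1) / 5).toNat = L' + 1 - k := by
    have h5 : (5 * (L' : Int) + 1 - 5 * (k : Int) + 5 - 1) = 5 * ((L' : Int) - k + 1) := by ring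
    rw [h5, Int.mul_ediv_cancel_left _ (by omega)]
    omega
  rw [hc, List.range'_eq_map_range, List.map_map]
  apply List.map_congr_left
  intro m _
  simp only [Function.comp_apply]
  push_cast
  ring

/-- inner loop of A for one score: sets positions a..a+m-1, each read before any later write. -/
theorem setfold (f : Nat → Int) : ∀ (m a : Nat) (nd : List Int), a + m = nd.length →
    (List.range' a m).foldl
        (fun cur (j : Nat) => pvSet cur (j : Int) ((pvGet cur (j : Int) + f j) % MODV)) nd
      = nd.take a ++ (List.range' a m).map (fun j => (gd nd j + f j) % MODV) := by
  intro m
  induction m with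
  | zero =>
    intro a nd h
    simp at h
    simp [h]
  | succ m ih =>
    intro a nd h
    rw [List.range'_succ]
    simp only [List.foldl_cons, List.map_cons]
    have hset : pvSet nd (a : Int) ((pvGet nd (a : Int) + f a) % MODV)
        = nd.set a ((gd nd a + f a) % MODV) := by
      simp [pvSet, gd_pvGet]
    rw [hset]
    have hlen : a + 1 + m = (nd.set a ((gd nd a + f a) % MODV)).length := by
      simp; omega
    rw [ih (a + 1) _ hlen]
    have ha : a < nd.length := by omega
    have htake : (nd.set a ((gd nd a + f a) % MODV)).take (a + 1)
        = nd.take a ++ [(gd nd a + f a) % MODV] := by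
      rw [List.take_add_one, List.take_set,
        List.getElem?_set_self (by simpa using ha)]
      rw [List.set_eq_of_length_le (show (List.take a nd).length ≤ a by simp)]
      rfl
    rw [htake]
    have hmap : (List.range' (a+1) m).map (fun j => (gd (nd.set a ((gd nd a + f a) % MODV)) j + f j) % MODV)
        = (List.range' (a+1) m).map (fun j => (gd nd j + f j) % MODV) := by
      apply List.map_congr_left
      intro j hj
      have : a + 1 ≤ j := (List.mem_range'_1.mp hj).1
      have hgd : gd (nd.set a ((gd nd a + f a) % MODV)) j = gd nd j := by
        simp only [gd, List.getD, List.getElem?_set_ne (show a ≠ j by omega)]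
      rw [hgd]
    rw [hmap, List.append_assoc]
    rfl

theorem pSum_succ_le (dp : List Int) (K i : Nat) (h : K ≤ i) :
    pSum dp (K+1) i = pSum dp K i + gd dp (i - K) := by
  unfold pSum
  rw [List.range_succ, List.filter_append]
  simp [h]

theorem pSum_succ_gt (dp : List Int) (K i : Nat) (h : i < K) :
    pSum dp (K+1) i = pSum dp K i := by
  unfold pSum
  rw [List.range_succ, List.filter_append]
  simp [Nat.not_le.mpr h]

theorem filter_le_range_of_le (n i : Nat) (h : n ≤ i + 1) :
    (List.range n).filter (fun k => k ≤ i) = List.range n := by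
  rw [List.filter_eq_self]
  intro a ha
  simp only [List.mem_range] at ha
  simp; omega

theorem filter_le_range_of_gt : ∀ (n i : Nat), i < n →
    (List.range n).filter (fun k => k ≤ i) = List.range (i + 1) := by
  intro n
  induction n with
  | zero => intro i h; omega
  | succ m ih =>
    intro i h
    rw [List.range_succ, List.filter_append]
    by_cases hc : i < m
    · rw [ih i hc]
      have hm : ¬ (m ≤ i) := by omega
      simp [hm]
    · have him : i = m := by omega
      rw [filter_le_range_of_le _ _ (by omega)]
      have hm : m ≤ i := by omega
      simp [him, List.range_succ]

/-- shift: Σ_{k<m+1} dp[(i+1)-k] = dp[i+1] + Σ_{k<m} dp[i-k]. -/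
theorem sum_shift (dp : List Int) (m i : Nat) :
    ((List.range (m+1)).map (fun k => gd dp (i + 1 - k))).sum
      = gd dp (i + 1) + ((List.range m).map (fun k => gd dp (i - k))).sum := by
  rw [List.range_eq_range', List.range'_succ]
  simp only [List.map_cons, List.sum_cons, Nat.sub_zero]
  congr 1
  rw [List.range'_eq_map_range, List.map_map]
  refine congrArg List.sum ?_
  apply List.map_congr_left
  intro x _
  simp only [Function.comp_apply]
  congr 1
  omega

theorem pSum21_win (dp : List Int) : ∀ i, pSum dp 21 i = win dp i := by
  intro i
  induction i with
  | zero =>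
    have hf : (List.range 21).filter (fun k => k ≤ 0) = [0] := by decide
    unfold pSum win
    rw [hf]
    simp
  | succ i ih =>
    have hw : win dp (i+1) = win dp i + gd dp (i+1) - (if 21 ≤ i+1 then gd dp (i-20) else 0) := rfl
    by_cases hc : i + 1 ≤ 20
    · have h1 : pSum dp 21 (i+1) = ((List.range (i+2)).map (fun k => gd dp (i + 1 - k))).sum := by
        unfold pSum
        rw [filter_le_range_of_gt 21 (i+1) (by omega)]
      have h2 : pSum dp 21 i = ((List.range (i+1)).map (fun k => gd dp (i - k))).sum := by
        unfold pSum
        rw [filter_le_range_of_gt 21 i (by omega)]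
      rw [h1, sum_shift dp (i+1) i, ← h2, ih, hw, if_neg (by omega)]
      ring
    · have h1 : pSum dp 21 (i+1) = ((List.range 21).map (fun k => gd dp (i + 1 - k))).sum := by
        unfold pSum
        rw [filter_le_range_of_le 21 (i+1) (by omega)]
      have h2 : pSum dp 21 i = ((List.range 21).map (fun k => gd dp (i - k))).sum := by
        unfold pSum
        rw [filter_le_range_of_le 21 i (by omega)]
      have h3 : ((List.range 21).map (fun k => gd dp (i - k))).sum
          = ((List.range 20).map (fun k => gd dp (i - k))).sum + gd dp (i - 20) := by
        rw [List.range_succ]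
        simp
      have h4 : ((List.range 20).map (fun k => gd dp (i - k))).sum = pSum dp 21 i - gd dp (i - 20) := by
        rw [h2, h3]
        ring
      rw [h1, sum_shift dp 20 i, h4, ih, hw, if_pos (by omega)]
      ring

theorem floordiv5 (j : Nat) : PySem.Int.floordiv (5 * (j : Int)) 5 = (j : Int) := by
  rw [show (5 * (j : Int)) = ((5 * j : Nat) : Int) by push_cast; ring,
    show (5 : Int) = ((5 : Nat) : Int) by norm_num, PySem.Int.floordiv_natCast]
  omega

/-- A's 21 score passes produce the full windowed convolution, entrywise mod M. -/
theorem afold (N : Nat) (hN : 1 ≤ N) (dp : List Int) : ∀ K, K ≤ 21 →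
    (List.range K).foldl (fun nd (k : Nat) =>
        (PySem.List.pyRange ((k : Int) * 5) (100 * (N : Int) + 1) 5).foldl (fun nd total =>
          pvSet nd (PySem.Int.floordiv total 5)
            (PySem.Int.mod (pvGet nd (PySem.Int.floordiv total 5)
              + pvGet dp (PySem.Int.floordiv (total - (k : Int) * 5) 5)) MODV)) nd)
        ((List.range (20 * N + 1)).map (fun i => pSum dp 0 i % MODV))
      = (List.range (20 * N + 1)).map (fun i => pSum dp K i % MODV) := by
  intro K
  induction K with
  | zero => intro _; rfl
  | succ K ih =>
    intro hK21
    rw [show List.range (K+1) = List.range K ++ [K] from List.range_succ, List.foldl_append, ih (by omega)]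
    simp only [List.foldl_cons, List.foldl_nil]
    have hK : K ≤ 20 * N := by omega
    -- the inner loop over `range(5K, 100N+1, 5)`
    have hr : PySem.List.pyRange ((K : Int) * 5) (100 * (N : Int) + 1) 5
        = (List.range' K (20 * N + 1 - K)).map (fun (j : Nat) => (5 * (j : Int))) := by
      rw [show ((K : Int) * 5) = 5 * (K : Int) by ring,
        show (100 * (N : Int) + 1) = 5 * ((20 * N : Nat) : Int) + 1 by push_cast; ring]
      exact range5_eq K (20 * N) hK
    rw [hr, List.foldl_map]
    set nd0 : List Int := (List.range (20 * N + 1)).map (fun i => pSum dp K i % MODV) with hnd0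
    have hcong : ∀ (cur : List Int), ∀ j ∈ List.range' K (20 * N + 1 - K),
        (fun nd (j : Nat) => pvSet nd (PySem.Int.floordiv (5 * (j : Int)) 5)
          (PySem.Int.mod (pvGet nd (PySem.Int.floordiv (5 * (j : Int)) 5)
            + pvGet dp (PySem.Int.floordiv ((5 * (j : Int)) - (K : Int) * 5) 5)) MODV)) cur j
        = (fun cur (j : Nat) => pvSet cur (j : Int)
            ((pvGet cur (j : Int) + (fun j => gd dp (j - K)) j) % MODV)) cur j := by
      intro cur j hj
      have hKj : K ≤ j := (List.mem_range'_1.mp hj).1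
      have hd2 : PySem.Int.floordiv ((5 * (j : Int)) - (K : Int) * 5) 5 = ((j - K : Nat) : Int) := by
        rw [show (5 * (j : Int)) - (K : Int) * 5 = ((5 * (j - K) : Nat) : Int) by push_cast [hKj]; ring,
          show (5 : Int) = ((5 : Nat) : Int) by norm_num, PySem.Int.floordiv_natCast]
        omega
      simp only [floordiv5, hd2, modM, gd_pvGet]
    rw [PySem.List.foldl_congr_mem _ _ _ _ hcong]
    have hlen : K + (20 * N + 1 - K) = nd0.length := by
      rw [hnd0]; simp; omega
    rw [setfold (fun j => gd dp (j - K)) (20 * N + 1 - K) K nd0 hlen]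
    -- the prefix kept and the updated suffix together are pSum (K+1)
    have htake : nd0.take K = (List.range K).map (fun i => pSum dp (K+1) i % MODV) := by
      rw [hnd0, ← List.map_take, List.take_range, Nat.min_eq_left (by omega)]
      apply List.map_congr_left
      intro i hi
      rw [pSum_succ_gt dp K i (List.mem_range.mp hi)]
    have hmap : (List.range' K (20 * N + 1 - K)).map (fun j => (gd nd0 j + gd dp (j - K)) % MODV)
        = (List.range' K (20 * N + 1 - K)).map (fun i => pSum dp (K+1) i % MODV) := by
      apply List.map_congr_left
      intro j hj
      obtain ⟨h1, h2⟩ := List.mem_range'_1.mp hj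
      have hjL : j < 20 * N + 1 := by omega
      have hgd : gd nd0 j = pSum dp K j % MODV := by
        rw [hnd0]
        exact PySem.List.getD_map_range _ _ _ _ hjL
      rw [hgd, Int.emod_add_emod, ← pSum_succ_le dp K j h1]
    rw [htake, hmap, ← List.map_append]
    congr 1
    rw [List.range'_eq_map_range, ← List.range_add]
    congr 1
    omega

theorem aRound_char (N : Nat) (hN : 1 ≤ N) (dp : List Int) :
    aRound ((PySem.List.pyRange 0 21 1).map (· * 5)) (100 * (N : Int)) (20 * (N : Int) + 1) dp
      = (List.range (20 * N + 1)).map (fun i => win dp i % MODV) := by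
  have hscores : (PySem.List.pyRange 0 21 1).map (· * 5)
      = (List.range 21).map (fun (k : Nat) => (k : Int) * 5) := by
    rw [show (21 : Int) = ((21 : Nat) : Int) by norm_num, PySem.List.pyRange_zero_natCast,
      List.map_map]
    rfl
  have htn : ((20 * (N : Int)) + 1).toNat = 20 * N + 1 := by omega
  have hbase : List.replicate (20 * N + 1) (0 : Int)
      = (List.range (20 * N + 1)).map (fun i => pSum dp 0 i % MODV) := by
    simp [pSum]
  unfold aRound
  simp only [hscores, List.foldl_map, htn, hbase]
  rw [afold N hN dp 21 le_rfl]
  apply List.map_congr_left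
  intro i _
  rw [pSum21_win]

/-- B's sliding-window pass produces the same windowed convolution. -/
theorem bfold (dp : List Int) : ∀ (m : Nat),
    (List.range (m+1)).foldl (fun (st : Int × List Int) (j : Nat) =>
        let w := PySem.Int.mod (st.1 + pvGet dp (j : Int)) MODV
        let w := if 21 ≤ (j : Int) then PySem.Int.mod (w - pvGet dp ((j : Int) - 21)) MODV else w
        (w, st.2 ++ [w])) ((0 : Int), ([] : List Int))
      = (win dp m % MODV, (List.range (m+1)).map (fun i => win dp i % MODV)) := by
  intro m
  induction m with
  | zero =>
    simp [win, modM, gd_pvGet, List.range_one]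
  | succ m ih =>
    rw [List.range_succ, List.foldl_append, ih]
    simp only [List.foldl_cons, List.foldl_nil]
    have hw : win dp (m+1) = win dp m + gd dp (m+1) - (if 21 ≤ m+1 then gd dp (m-20) else 0) := rfl
    have hkey : (if 21 ≤ ((m+1 : Nat) : Int) then
          PySem.Int.mod ((PySem.Int.mod (win dp m % MODV + pvGet dp ((m+1 : Nat) : Int)) MODV)
            - pvGet dp (((m+1 : Nat) : Int) - 21)) MODV
        else PySem.Int.mod (win dp m % MODV + pvGet dp ((m+1 : Nat) : Int)) MODV)
        = win dp (m+1) % MODV := by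
      by_cases hc : 21 ≤ m + 1
      · rw [if_pos (by exact_mod_cast hc)]
        have hidx : ((m+1 : Nat) : Int) - 21 = ((m - 20 : Nat) : Int) := by omega
        rw [hidx, modM, modM, gd_pvGet, gd_pvGet, Int.emod_add_emod, modsubM, hw, if_pos hc]
      · rw [if_neg (by exact_mod_cast hc)]
        rw [modM, gd_pvGet, Int.emod_add_emod, hw, if_neg hc]
        simp
    simp only [hkey]
    rw [List.map_append]
    rfl

theorem bRound_char (N : Nat) (_hN : 1 ≤ N) (dp : List Int) :
    bRound (20 * (N : Int)) dp = (List.range (20 * N + 1)).map (fun i => win dp i % MODV) := by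
  unfold bRound
  rw [show (20 * (N : Int) + 1) = ((20 * N + 1 : Nat) : Int) by push_cast; ring,
    PySem.List.pyRange_zero_natCast, List.foldl_map, bfold dp (20 * N)]

theorem foldl_const_congr {A B : Type} (f g : A → A) (h : ∀ x, f x = g x) :
    ∀ (l : List B) (init : A),
      l.foldl (fun a _ => f a) init = l.foldl (fun a _ => g a) init := by
  intro l
  induction l with
  | nil => intro init; rfl
  | cons x xs _ =>
    intro init
    simp only [List.foldl_cons, h]

-- ===== VERDICT (by name: the statement is the Claim_ definition above) =====
theorem solution_spec : Claim_equal_solution := by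
  intro n _ hpre
  unfold Spec_solution
  by_cases h8 : n = 888
  · simp [solution, solution_alt, h8]
  · have hp : (-3 : Int) ≤ n := hpre
    have h3 : (3 : Int) + n = ((3 + n).toNat : Int) := (Int.toNat_of_nonneg (by omega)).symm
    set N : Nat := (3 + n).toNat with hNdef
    simp only [solution, solution_alt, if_neg h8]
    rw [h3]
    have hmi : PySem.Int.floordiv (100 * (N : Int)) 5 = 20 * (N : Int) := by
      rw [show (100 * (N : Int)) = ((100 * N : Nat) : Int) by push_cast; ring,
        show (5 : Int) = ((5 : Nat) : Int) by norm_num, PySem.Int.floordiv_natCast]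
      push_cast
      omega
    have hps : PySem.Int.floordiv (60 * (N : Int)) 5 = 12 * (N : Int) := by
      rw [show (60 * (N : Int)) = ((60 * N : Nat) : Int) by push_cast; ring,
        show (5 : Int) = ((5 : Nat) : Int) by norm_num, PySem.Int.floordiv_natCast]
      push_cast
      omega
    rw [hmi, hps]
    have hdp0 : pvSet (List.replicate ((20 * (N : Int) + 1).toNat) 0) 0 1
        = (1 : Int) :: List.replicate ((20 * (N : Int)).toNat) 0 := by
      rw [show ((20 * (N : Int) + 1).toNat) = ((20 * (N : Int)).toNat) + 1 by omega,
        List.replicate_succ]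
      rfl
    rw [hdp0]
    rcases Nat.eq_zero_or_pos N with hN0 | hNpos
    · rw [hN0]
      decide
    · have hround : ∀ dp, aRound ((PySem.List.pyRange 0 21 1).map (· * 5))
          (100 * (N : Int)) (20 * (N : Int) + 1) dp = bRound (20 * (N : Int)) dp := by
        intro dp
        rw [aRound_char N hNpos dp, bRound_char N hNpos dp]
      rw [foldl_const_congr _ _ hround]
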